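-- pv_equiv track=rewrite | github.com/Madaist/Hare-and-Hounds | tema3.py | verif_mutare_verticala_matrici
-- ===== SOURCE A (Python) =====
-- def verificare_mutare_verticala(linie_curenta, col_curenta, linie_mutare, col_mutare):
--     if col_curenta == col_mutare:
--         if linie_curenta == linie_mutare + 1 or linie_curenta == linie_mutare - 1:
--             return True
--     return False
--
-- def poz_caini(tabla):
--     pozitii_caini = []
--     for i in range(len(tabla)):
--         for j in range(len(tabla[i])):
--             if tabla[i][j] == 'c':
--                 pozitii_caini.append((i, j))
--     return pozitii_caini
--
-- def verif_mutare_verticala_matrici(matrice_anterioara, matrice_actualizata):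
--     poz_caini_anterioara = poz_caini(matrice_anterioara)
--     poz_caini_actual = poz_caini(matrice_actualizata)
--
--     prev_pos = [x for x in poz_caini_anterioara if x not in poz_caini_actual]
--     actual_pos = [x for x in poz_caini_actual if x not in poz_caini_anterioara]
--
--     if verificare_mutare_verticala(prev_pos[0][0], prev_pos[0][1], actual_pos[0][0], actual_pos[0][1]):
--         return True
--     return False
-- ===== SOURCE B (Python) =====
-- def verif_mutare_verticala_matrici(matrice_anterioara, matrice_actualizata):
--     # One merged row-major scan over both boards' cells; raises IndexError
--     # (like A) when no dog moved away or no dog appeared.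
--     source = []
--     dest = []
--     for i in range(max(len(matrice_anterioara), len(matrice_actualizata))):
--         row_a = matrice_anterioara[i] if i < len(matrice_anterioara) else []
--         row_b = matrice_actualizata[i] if i < len(matrice_actualizata) else []
--         for j in range(max(len(row_a), len(row_b))):
--             a = row_a[j] if j < len(row_a) else None
--             b = row_b[j] if j < len(row_b) else None
--             if a == 'c' and b != 'c':
--                 source.append((i, j))
--             if b == 'c' and a != 'c':
--                 dest.append((i, j))
--     si, sj = source[0]
--     di, dj = dest[0]
--     return sj == dj and abs(si - di) == 1
-- ===== Notes on version B (the rewrite author's own statement) =====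
-- stated objective: alternative
-- what changed: one merged row-major cell-by-cell scan of the two boards collects the moved-from and moved-to cells directly, replacing A's two position-list builds plus two quadratic 'x not in list' filter passes
import Mathlib
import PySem

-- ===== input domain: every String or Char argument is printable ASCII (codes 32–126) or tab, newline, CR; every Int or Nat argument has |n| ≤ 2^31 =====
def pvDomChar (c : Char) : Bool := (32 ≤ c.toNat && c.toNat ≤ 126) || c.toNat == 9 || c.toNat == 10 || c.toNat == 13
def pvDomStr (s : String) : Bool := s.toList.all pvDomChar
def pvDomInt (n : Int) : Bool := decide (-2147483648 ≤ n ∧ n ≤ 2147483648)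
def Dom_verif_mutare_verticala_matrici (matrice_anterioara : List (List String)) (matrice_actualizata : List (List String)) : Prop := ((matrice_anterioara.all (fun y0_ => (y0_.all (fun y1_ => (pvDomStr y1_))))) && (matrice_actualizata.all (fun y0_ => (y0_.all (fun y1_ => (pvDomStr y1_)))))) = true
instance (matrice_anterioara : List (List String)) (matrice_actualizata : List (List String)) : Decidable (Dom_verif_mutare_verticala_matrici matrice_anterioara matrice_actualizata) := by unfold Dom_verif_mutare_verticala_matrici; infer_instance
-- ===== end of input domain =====

-- B replaces A's two dog-position-list builds plus two quadratic 'not in' filters by one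
-- merged row-major cell-by-cell scan of both boards (objective: alternative decomposition).
-- Both raise IndexError when no dog moved away or none appeared; Pre_ excludes exactly that.

-- ===== PORT A =====
def verificare_mutare_verticala (linie_curenta : Int) (col_curenta : Int) (linie_mutare : Int) (col_mutare : Int) : Bool :=
  if col_curenta == col_mutare then
    if linie_curenta == linie_mutare + 1 || linie_curenta == linie_mutare - 1 then true else false
  else false

def poz_caini (tabla : List (List String)) : List (Int × Int) :=
  (List.range tabla.length).foldl (fun (acc : List (Int × Int)) (i : Nat) =>
    (List.range (tabla[i]?.getD []).length).foldl (fun (acc2 : List (Int × Int)) (j : Nat) =>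
      if (tabla[i]?.getD [])[j]? == some "c" then acc2 ++ [((i : Int), (j : Int))] else acc2)
      acc) []

def verif_mutare_verticala_matrici (matrice_anterioara : List (List String)) (matrice_actualizata : List (List String)) : Bool :=
  let poz_caini_anterioara := poz_caini matrice_anterioara
  let poz_caini_actual := poz_caini matrice_actualizata
  let prev_pos := poz_caini_anterioara.filter (fun x => !(poz_caini_actual.contains x))
  let actual_pos := poz_caini_actual.filter (fun x => !(poz_caini_anterioara.contains x))
  match prev_pos, actual_pos with
  | p :: _, q :: _ =>
      if verificare_mutare_verticala p.1 p.2 q.1 q.2 then true else false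
  | _, _ => false    -- Python raises IndexError here; excluded by Pre_

-- ===== PORT B =====
def verif_mutare_verticala_matrici_alt (matrice_anterioara : List (List String)) (matrice_actualizata : List (List String)) : Bool :=
  let sd := (List.range (max matrice_anterioara.length matrice_actualizata.length)).foldl
    (fun (acc : List (Int × Int) × List (Int × Int)) (i : Nat) =>
      let row_a := matrice_anterioara[i]?.getD []
      let row_b := matrice_actualizata[i]?.getD []
      (List.range (max row_a.length row_b.length)).foldl
        (fun (acc2 : List (Int × Int) × List (Int × Int)) (j : Nat) =>
          let a := row_a[j]?
          let b := row_b[j]?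
          let acc3 := if a == some "c" && !(b == some "c") then
              (acc2.1 ++ [((i : Int), (j : Int))], acc2.2) else acc2
          if b == some "c" && !(a == some "c") then
              (acc3.1, acc3.2 ++ [((i : Int), (j : Int))]) else acc3)
        acc)
    ([], [])
  -- source[0] / dest[0]: Python raises IndexError when either is empty; excluded by Pre_
  (sd.1.head?.bind (fun p => sd.2.head?.map (fun q =>
    p.2 == q.2 && (p.1 - q.1).natAbs == 1))).getD false

-- ===== PRECONDITION & SPEC =====
-- Pre_ excludes exactly the inputs where both Pythons raise IndexError: no board cell that
-- holds 'c' before and not after (nothing moved away), or none that holds 'c' after and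
-- not before (nothing appeared).
def Pre_verif_mutare_verticala_matrici (matrice_anterioara : List (List String)) (matrice_actualizata : List (List String)) : Prop :=
  (∃ i ∈ List.range matrice_anterioara.length, ∃ j ∈ List.range (matrice_anterioara[i]?.getD []).length,
      (matrice_anterioara[i]?.getD [])[j]? = some "c" ∧ (matrice_actualizata[i]?.getD [])[j]? ≠ some "c") ∧
  (∃ i ∈ List.range matrice_actualizata.length, ∃ j ∈ List.range (matrice_actualizata[i]?.getD []).length,
      (matrice_actualizata[i]?.getD [])[j]? = some "c" ∧ (matrice_anterioara[i]?.getD [])[j]? ≠ some "c")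
instance (matrice_anterioara : List (List String)) (matrice_actualizata : List (List String)) : Decidable (Pre_verif_mutare_verticala_matrici matrice_anterioara matrice_actualizata) := by unfold Pre_verif_mutare_verticala_matrici; infer_instance

def pvWitness_verif_mutare_verticala_matrici : List (List String) × List (List String) :=
  ([["c", "."], [".", "."]], [[".", "."], ["c", "."]])

def Spec_verif_mutare_verticala_matrici (matrice_anterioara : List (List String)) (matrice_actualizata : List (List String)) (out : Bool) : Prop := out = verif_mutare_verticala_matrici_alt matrice_anterioara matrice_actualizata
instance (matrice_anterioara : List (List String)) (matrice_actualizata : List (List String)) (out : Bool) : Decidable (Spec_verif_mutare_verticala_matrici matrice_anterioara matrice_actualizata out) := by unfold Spec_verif_mutare_verticala_matrici; infer_instance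

-- ===== CLAIM (what is proved, stated in full; the proofs are below) =====
def Claim_equal_verif_mutare_verticala_matrici : Prop := ∀ (matrice_anterioara : List (List String)) (matrice_actualizata : List (List String)), Dom_verif_mutare_verticala_matrici matrice_anterioara matrice_actualizata → Pre_verif_mutare_verticala_matrici matrice_anterioara matrice_actualizata → Spec_verif_mutare_verticala_matrici matrice_anterioara matrice_actualizata (verif_mutare_verticala_matrici matrice_anterioara matrice_actualizata)

-- ===== LEMMAS AND PROOFS =====

-- helper predicates for the canonical moved-cell list
def movedCond (m1 m2 : List (List String)) (i j : Nat) : Bool :=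
  ((m1[i]?.getD [])[j]? == some "c") && !((m2[i]?.getD [])[j]? == some "c")

-- the canonical "cells that are 'c' in m1 but not in m2", in row-major order
def movedList (m1 m2 : List (List String)) : List (Int × Int) :=
  (List.range m1.length).flatMap (fun (i : Nat) =>
    ((List.range (m1[i]?.getD []).length).filter (fun j => movedCond m1 m2 i j)).map
      (fun (j : Nat) => ((i : Int), (j : Int))))

theorem flatMap_congr_mem {α β : Type} {l : List α} {f g : α → List β}
    (h : ∀ x ∈ l, f x = g x) : l.flatMap f = l.flatMap g := by
  induction l with
  | nil => rfl
  | cons x t ih =>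
      simp only [List.flatMap_cons, h x (by simp), ih (fun y hy => h y (by simp [hy]))]

-- A's poz_caini in flatMap/filter form
theorem poz_caini_eq (m : List (List String)) :
    poz_caini m = (List.range m.length).flatMap (fun (i : Nat) =>
      ((List.range (m[i]?.getD []).length).filter
          (fun j => (m[i]?.getD [])[j]? == some "c")).map
        (fun (j : Nat) => ((i : Int), (j : Int)))) := by
  unfold poz_caini
  simp only [PySem.List.foldl_append_if, PySem.List.foldl_append_eq_flatMap, List.nil_append]

-- membership in poz_caini
theorem mem_poz_caini (m : List (List String)) (i j : Nat) :
    (((i : Int), (j : Int)) ∈ poz_caini m) ↔ (m[i]?.getD [])[j]? = some "c" := by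
  rw [poz_caini_eq]
  simp only [List.mem_flatMap, List.mem_map, List.mem_filter, List.mem_range]
  constructor
  · rintro ⟨i', hi', j', ⟨hj', hc⟩, hEq⟩
    have h1 : i' = i := by
      have := congrArg Prod.fst hEq; simpa using this
    have h2 : j' = j := by
      have := congrArg Prod.snd hEq; simpa using this
    subst h1; subst h2
    simpa using hc
  · intro hc
    have hj : j < (m[i]?.getD []).length := by
      rcases List.getElem?_eq_some_iff.mp hc with ⟨h, _⟩; exact h
    have hi : i < m.length := by
      by_contra h
      have : m[i]? = none := List.getElem?_eq_none (by omega)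
      simp [this] at hc
    exact ⟨i, hi, j, ⟨hj, by simpa using hc⟩, rfl⟩

-- A's filtered list equals movedList
theorem prev_eq_movedList (m1 m2 : List (List String)) :
    (poz_caini m1).filter (fun x => !((poz_caini m2).contains x)) = movedList m1 m2 := by
  rw [poz_caini_eq m1]
  unfold movedList
  rw [List.filter_flatMap]
  apply flatMap_congr_mem
  intro i hi
  rw [List.filter_map, List.filter_filter]
  congr 1
  apply List.filter_congr
  intro j hj
  have hd : (poz_caini m2).contains ((i : Int), (j : Int))
      = ((m2[i]?.getD [])[j]? == some "c") := by
    by_cases hc2 : (m2[i]?.getD [])[j]? = some "c" <;>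
      simp [mem_poz_caini, hc2]
  simp only [Function.comp, movedCond, hd, Bool.and_comm]

-- pair accumulator fold (B's inner loop)
theorem pairfold_inner {α β : Type} (l : List α) (p q : α → Bool) (f : α → β)
    (acc : List β × List β) :
    l.foldl (fun acc2 x =>
        let acc3 := if p x then (acc2.1 ++ [f x], acc2.2) else acc2
        if q x then (acc3.1, acc3.2 ++ [f x]) else acc3) acc
      = (acc.1 ++ (l.filter p).map f, acc.2 ++ (l.filter q).map f) := by
  induction l generalizing acc with
  | nil => simp
  | cons x t ih =>
      by_cases hp : p x <;> by_cases hq : q x <;>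
        simp [hp, hq, ih]

-- pair accumulator fold (B's outer loop)
theorem pairfold_outer {α β : Type} (l : List α) (g h : α → List β)
    (acc : List β × List β) :
    l.foldl (fun acc2 x => (acc2.1 ++ g x, acc2.2 ++ h x)) acc
      = (acc.1 ++ l.flatMap g, acc.2 ++ l.flatMap h) := by
  induction l generalizing acc with
  | nil => simp
  | cons x t ih => simp [ih]

-- a row filter over any padded column range collapses to the row's own range
theorem filter_cols_collapse (m1 m2 : List (List String)) (i : Nat) (c : Nat)
    (hc : (m1[i]?.getD []).length ≤ c) :
    (List.range c).filter (fun j => movedCond m1 m2 i j)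
      = (List.range (m1[i]?.getD []).length).filter (fun j => movedCond m1 m2 i j) := by
  have hsplit : c = (m1[i]?.getD []).length + (c - (m1[i]?.getD []).length) := by omega
  rw [hsplit, List.range_add, List.filter_append]
  have : ((List.range (c - (m1[i]?.getD []).length)).map
      (fun j => (m1[i]?.getD []).length + j)).filter (fun j => movedCond m1 m2 i j) = [] := by
    rw [List.filter_eq_nil_iff]
    intro j hj
    rcases List.mem_map.mp hj with ⟨k, _, rfl⟩
    have : (m1[i]?.getD [])[(m1[i]?.getD []).length + k]? = none :=
      List.getElem?_eq_none (by omega)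
    simp [movedCond]
  rw [this, List.append_nil]

-- the flatMap over any padded row range collapses to movedList
theorem bflat_eq_movedList (m1 m2 : List (List String)) (n : Nat) (hn : m1.length ≤ n)
    (cols : Nat → Nat) (hcols : ∀ i, (m1[i]?.getD []).length ≤ cols i) :
    (List.range n).flatMap (fun (i : Nat) =>
        ((List.range (cols i)).filter (fun j => movedCond m1 m2 i j)).map
          (fun (j : Nat) => ((i : Int), (j : Int))))
      = movedList m1 m2 := by
  have hsplit : n = m1.length + (n - m1.length) := by omega
  rw [hsplit, List.range_add, List.flatMap_append]
  have h2 : ((List.range (n - m1.length)).map (fun i => m1.length + i)).flatMap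
      (fun (i : Nat) => ((List.range (cols i)).filter
          (fun j => movedCond m1 m2 i j)).map (fun (j : Nat) => ((i : Int), (j : Int)))) = [] := by
    rw [List.flatMap_eq_nil_iff]
    intro i hi
    rcases List.mem_map.mp hi with ⟨k, _, rfl⟩
    have hnone : m1[m1.length + k]? = none := List.getElem?_eq_none (by omega)
    have : (List.range (cols (m1.length + k))).filter
        (fun j => movedCond m1 m2 (m1.length + k) j) = [] := by
      rw [List.filter_eq_nil_iff]
      intro j hj
      simp [movedCond]
    rw [this, List.map_nil]
  rw [h2, List.append_nil]
  unfold movedList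
  apply flatMap_congr_mem
  intro i hi
  rw [filter_cols_collapse m1 m2 i (cols i) (hcols i)]

-- the two per-move checks agree
theorem check_eq (p q : Int × Int) :
    (if verificare_mutare_verticala p.1 p.2 q.1 q.2 then true else false)
      = (p.2 == q.2 && (p.1 - q.1).natAbs == 1) := by
  obtain ⟨a, b⟩ := p
  obtain ⟨c, d⟩ := q
  unfold verificare_mutare_verticala
  simp only [beq_iff_eq]
  by_cases hb : b = d <;> by_cases h1 : a = c + 1 <;> by_cases h2 : a = c - 1 <;>
    simp [hb, h1, h2] <;> omega

-- ===== VERDICT (by name: the statement is the Claim_ definition above) =====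
theorem verif_mutare_verticala_matrici_spec : Claim_equal_verif_mutare_verticala_matrici := by
  unfold Claim_equal_verif_mutare_verticala_matrici
  intro ma mu _ _
  unfold Spec_verif_mutare_verticala_matrici
  unfold verif_mutare_verticala_matrici verif_mutare_verticala_matrici_alt
  simp only []
  rw [show (fun (acc2 : List (Int × Int) × List (Int × Int)) (i : Nat) =>
      (List.range (max (ma[i]?.getD []).length (mu[i]?.getD []).length)).foldl
        (fun acc3 (j : Nat) =>
          let a := (ma[i]?.getD [])[j]?
          let b := (mu[i]?.getD [])[j]?
          let acc4 := if a == some "c" && !(b == some "c") then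
              (acc3.1 ++ [((i : Int), (j : Int))], acc3.2) else acc3
          if b == some "c" && !(a == some "c") then
              (acc4.1, acc4.2 ++ [((i : Int), (j : Int))]) else acc4) acc2)
    = (fun acc2 i =>
      (acc2.1 ++ ((List.range (max (ma[i]?.getD []).length (mu[i]?.getD []).length)).filter
          (fun j => movedCond ma mu i j)).map (fun (j : Nat) => ((i : Int), (j : Int))),
       acc2.2 ++ ((List.range (max (ma[i]?.getD []).length (mu[i]?.getD []).length)).filter
          (fun j => movedCond mu ma i j)).map (fun (j : Nat) => ((i : Int), (j : Int))))) from by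
    funext acc2 i
    exact pairfold_inner _ _ _ _ acc2]
  rw [pairfold_outer]
  simp only [List.nil_append]
  rw [bflat_eq_movedList ma mu (max ma.length mu.length) (Nat.le_max_left _ _)
        (fun i => max (ma[i]?.getD []).length (mu[i]?.getD []).length)
        (fun i => Nat.le_max_left _ _),
      bflat_eq_movedList mu ma (max ma.length mu.length) (Nat.le_max_right _ _)
        (fun i => max (ma[i]?.getD []).length (mu[i]?.getD []).length)
        (fun i => Nat.le_max_right _ _)]
  rw [prev_eq_movedList ma mu, prev_eq_movedList mu ma]
  cases movedList ma mu with
  | nil => rfl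
  | cons p tp =>
      cases movedList mu ma with
      | nil => rfl
      | cons q tq =>
          simpa using check_eq p q
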